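-- pv_equiv track=rewrite | github.com/Pecky-0/Web_2025 | Lab1/src/Task_3/search_phrase.py | phrase_search_adjacent
-- ===== SOURCE A (Python) =====
-- def phrase_search_adjacent(term_positions, phrase_terms):
--     # phrase_terms: 规范化的词项列表
--     # 返回在文档中连续出现这些词项的 docid 列表
--     if not phrase_terms:
--         return []
--     # 获取每个词的位置信息映射
--     maps = [term_positions.get(t, {}) for t in phrase_terms]
--     # 候选文档 = 所有词项键的交集
--     doc_sets = [set(m.keys()) for m in maps]
--     if not doc_sets:
--         return []
--     cand = set.intersection(*doc_sets)
--     res = []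
--     for doc in cand:
--     # 对于每个候选文档，检查位置链是否连续
--         pos_lists = [set(m[doc]) for m in maps]
--     # 遍历第一个词的所有位置并检查后续词是否在相邻位置
--         found = False
--         for p in pos_lists[0]:
--             ok = True
--             for i in range(1, len(pos_lists)):
--                 if (p + i) not in pos_lists[i]:
--                     ok = False
--                     break
--             if ok:
--                 found = True
--                 break
--         if found:
--             res.append(doc)
--     return res
-- ===== SOURCE B (Python) =====
-- def phrase_search_adjacent(term_positions, phrase_terms):
--     if not phrase_terms:
--         return []
--     maps = [term_positions.get(t, {}) for t in phrase_terms]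
--     cand = set.intersection(*[set(m.keys()) for m in maps])
--
--     def has_phrase(doc):
--         # progressively narrow the set of viable phrase start positions
--         starts = set(maps[0][doc])
--         for i in range(1, len(maps)):
--             nxt = set(maps[i][doc])
--             starts = {q for q in starts if q + i in nxt}
--         return bool(starts)
--
--     return [doc for doc in cand if has_phrase(doc)]
-- ===== Notes on version B (the rewrite author's own statement) =====
-- stated objective: alternative
-- what changed: A tests each first-term position with an inner adjacency probe per later term; B instead keeps one set of viable start positions and narrows it term by term (filter by shifted membership), appending a doc iff the surviving set is non-empty, with the outer loop as a filter comprehension instead of an accumulator loop.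
import Mathlib
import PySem

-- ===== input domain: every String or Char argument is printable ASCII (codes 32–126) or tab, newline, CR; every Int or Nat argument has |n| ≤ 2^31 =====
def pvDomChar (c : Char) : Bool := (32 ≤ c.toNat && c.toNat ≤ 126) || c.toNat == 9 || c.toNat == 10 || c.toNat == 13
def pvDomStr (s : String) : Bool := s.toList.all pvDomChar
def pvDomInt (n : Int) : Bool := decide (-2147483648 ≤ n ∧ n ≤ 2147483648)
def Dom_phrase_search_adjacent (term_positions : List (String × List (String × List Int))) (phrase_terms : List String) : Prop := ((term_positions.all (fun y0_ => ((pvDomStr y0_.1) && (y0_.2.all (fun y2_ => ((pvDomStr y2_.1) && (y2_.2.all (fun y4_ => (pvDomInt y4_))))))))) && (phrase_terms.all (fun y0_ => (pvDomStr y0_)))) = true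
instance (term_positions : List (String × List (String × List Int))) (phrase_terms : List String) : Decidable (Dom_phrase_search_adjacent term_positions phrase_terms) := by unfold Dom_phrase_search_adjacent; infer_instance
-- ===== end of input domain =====

-- B replaces A's per-first-position adjacency probing with progressive narrowing of
-- one set of viable phrase start positions, and its outer loop is a filter
-- comprehension instead of an append accumulator (objective: alternative).
-- Both versions iterate the candidate-doc set in the same order, so the returned
-- lists are equal (the ports share one deterministic first-occurrence set order).

-- ===== PORT A =====
-- 'found': for p in pos_lists[0] … check p+i in pos_lists[i] for i in range(1, len) (break ≡ any/all)
def pvAfound (pos_lists : List (PySem.Set Int)) : Bool :=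
  match pos_lists with
  | [] => false
  | p0 :: _ =>
    p0.any (fun p =>
      (PySem.List.pyRange 1 (pos_lists.length : Int)).all (fun i =>
        match PySem.List.pyGet? pos_lists i with
        | some s => PySem.Set.contains s (p + i)   -- i is always in range (1 ≤ i < len)
        | none => false))

def phrase_search_adjacent (term_positions : List (String × List (String × List Int))) (phrase_terms : List String) : List String :=
  if phrase_terms = [] then [] else
  let maps := phrase_terms.map (fun t => PySem.Dict.getD (PySem.Dict.mk term_positions) t [])
  let doc_sets := maps.map (fun m => PySem.Set.ofList (PySem.Dict.mk m).keys)
  if doc_sets = [] then [] else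
  let cand := match doc_sets with
    | [] => ([] : PySem.Set String)
    | s :: rest => rest.foldl PySem.Set.inter s
  cand.foldl (fun res doc =>
    -- m[doc] never raises: doc ∈ cand ⊆ keys of every m, so getD's default is never taken
    let pos_lists := maps.map (fun m => PySem.Set.ofList (PySem.Dict.getD (PySem.Dict.mk m) doc []))
    if pvAfound pos_lists then res ++ [doc] else res) []

-- ===== PORT B =====
-- 'has_phrase(doc)': starts = set(maps[0][doc]); for i in 1..len: starts = {q in starts : q+i in set(maps[i][doc])}; bool(starts)
def pvHasPhrase (maps : List (List (String × List Int))) (doc : String) : Bool :=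
  match maps with
  | [] => false
  | m0 :: _ =>
    let starts :=
      (PySem.List.pyRange 1 (maps.length : Int)).foldl
        (fun s i =>
          -- maps[i][doc] never raises here: 1 ≤ i < len and doc is a key of every map
          let nxt := PySem.Set.ofList (PySem.Dict.getD (PySem.Dict.mk (PySem.List.pyGetD maps i [])) doc [])
          PySem.Set.ofList (List.filter (fun q => PySem.Set.contains nxt (q + i)) s))
        (PySem.Set.ofList (PySem.Dict.getD (PySem.Dict.mk m0) doc []))
    !starts.isEmpty

def phrase_search_adjacent_alt (term_positions : List (String × List (String × List Int))) (phrase_terms : List String) : List String :=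
  if phrase_terms = [] then [] else
  let maps := phrase_terms.map (fun t => PySem.Dict.getD (PySem.Dict.mk term_positions) t [])
  let cand := match maps.map (fun m => PySem.Set.ofList (PySem.Dict.mk m).keys) with
    | [] => ([] : PySem.Set String)
    | s :: rest => rest.foldl PySem.Set.inter s
  List.filter (fun doc => pvHasPhrase maps doc) cand

-- ===== PRECONDITION & SPEC =====
def Spec_phrase_search_adjacent (term_positions : List (String × List (String × List Int))) (phrase_terms : List String) (out : List String) : Prop := out = phrase_search_adjacent_alt term_positions phrase_terms
instance (term_positions : List (String × List (String × List Int))) (phrase_terms : List String) (out : List String) : Decidable (Spec_phrase_search_adjacent term_positions phrase_terms out) := by unfold Spec_phrase_search_adjacent; infer_instance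

-- ===== CLAIM (what is proved, stated in full; the proofs are below) =====
def Claim_equal_phrase_search_adjacent : Prop := ∀ (term_positions : List (String × List (String × List Int))) (phrase_terms : List String), Dom_phrase_search_adjacent term_positions phrase_terms → Spec_phrase_search_adjacent term_positions phrase_terms (phrase_search_adjacent term_positions phrase_terms)

-- ===== LEMMAS AND PROOFS =====

-- membership in B's narrowing fold
theorem pv_fold_filter_mem (is : List Int) (P : Int → Int → Bool) (s : List Int) (y : Int) :
    y ∈ is.foldl (fun s i => PySem.Set.ofList (List.filter (fun q => P i q) s)) s ↔
      y ∈ s ∧ ∀ i ∈ is, P i y = true := by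
  induction is generalizing s with
  | nil => simp
  | cons i il ih =>
    simp only [List.foldl_cons, ih, PySem.Set.mem_ofList, List.mem_filter, List.mem_cons]
    constructor
    · rintro ⟨⟨hy, hp⟩, hall⟩
      exact ⟨hy, fun j hj => hj.elim (fun h => h ▸ hp) (hall j)⟩
    · rintro ⟨hy, hall⟩
      exact ⟨⟨hy, hall i (Or.inl rfl)⟩, fun j hj => hall j (Or.inr hj)⟩

-- A's scan over first-term positions, characterised
theorem pv_A_char (q0 : List Int) (qs : List (List Int)) :
    (pvAfound ((q0 :: qs).map PySem.Set.ofList) = true) ↔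
      ∃ p : Int, ∀ j : Nat, ∀ h : j < (q0 :: qs).length, p + (j : Int) ∈ (q0 :: qs)[j] := by
  simp only [pvAfound, List.map_cons, List.any_eq_true, PySem.Set.mem_ofList,
    List.all_eq_true, PySem.List.mem_pyRange_one]
  constructor
  · rintro ⟨p, hp0, hall⟩
    refine ⟨p, ?_⟩
    intro j hj
    cases j with
    | zero => simpa using hp0
    | succ k =>
      have h1 : (1 : Int) ≤ ((k + 1 : Nat) : Int) := by push_cast; omega
      have h2 : ((k + 1 : Nat) : Int) < ((PySem.Set.ofList q0 :: qs.map PySem.Set.ofList).length : Int) := by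
        simp only [List.length_cons, List.length_map]
        push_cast
        simp only [List.length_cons] at hj
        omega
      have := hall ((k + 1 : Nat) : Int) ⟨h1, h2⟩
      rw [PySem.List.pyGet?_natCast] at this
      have hk : k + 1 < (PySem.Set.ofList q0 :: qs.map PySem.Set.ofList).length := by
        simpa using hj
      rw [List.getElem?_eq_getElem hk] at this
      have hmem := (PySem.Set.contains_iff _ _).mp this
      have hgl : (PySem.Set.ofList q0 :: qs.map PySem.Set.ofList)[k + 1] =
          PySem.Set.ofList (q0 :: qs)[k + 1] := by
        simp
      rw [hgl, PySem.Set.mem_ofList] at hmem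
      exact hmem
  · rintro ⟨p, hp⟩
    refine ⟨p, by simpa using hp 0 (by simp), ?_⟩
    intro i hi
    obtain ⟨hi1, hi2⟩ := hi
    have hnn : (0 : Int) ≤ i := by omega
    obtain ⟨k, rfl⟩ : ∃ k : Nat, i = (k : Int) := ⟨i.toNat, (Int.toNat_of_nonneg hnn).symm⟩
    rw [PySem.List.pyGet?_natCast]
    have hk : k < (PySem.Set.ofList q0 :: qs.map PySem.Set.ofList).length := by
      simp only [List.length_cons, List.length_map]
      simp only [List.length_cons, List.length_map] at hi2
      exact_mod_cast hi2
    rw [List.getElem?_eq_getElem hk]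
    have hk2 : k < (q0 :: qs).length := by
      simp only [List.length_cons, List.length_map] at hk ⊢
      omega
    have hgl : (PySem.Set.ofList q0 :: qs.map PySem.Set.ofList)[k] =
        PySem.Set.ofList ((q0 :: qs)[k]'hk2) := by
      cases k with
      | zero => simp
      | succ k' => simp
    rw [hgl]
    exact (PySem.Set.contains_iff _ _).mpr
      ((PySem.Set.mem_ofList _ _).mpr (hp k hk2))

-- B's narrowing fold is non-empty iff some start position survives every term:
-- the per-doc bodies agree (A's positional scan equals B's narrowing test)
theorem pv_key (maps : List (List (String × List Int))) (doc : String) (hm : maps ≠ []) :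
    pvAfound (maps.map (fun m => PySem.Set.ofList (PySem.Dict.getD (PySem.Dict.mk m) doc []))) =
    pvHasPhrase maps doc := by
  obtain ⟨m0, ms, rfl⟩ := List.exists_cons_of_ne_nil hm
  have hA : (m0 :: ms).map (fun m => PySem.Set.ofList (PySem.Dict.getD (PySem.Dict.mk m) doc [])) =
      ((PySem.Dict.getD (PySem.Dict.mk m0) doc []) ::
        (ms.map (fun m => PySem.Dict.getD (PySem.Dict.mk m) doc []))).map PySem.Set.ofList := by
    simp [List.map_map, Function.comp]
  rw [Bool.eq_iff_iff, hA, pv_A_char]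
  simp only [pvHasPhrase, Bool.not_eq_true', List.isEmpty_eq_false_iff]
  constructor
  · rintro ⟨p, hp⟩
    apply List.ne_nil_of_mem (a := p)
    rw [pv_fold_filter_mem]
    constructor
    · rw [PySem.Set.mem_ofList]
      simpa using hp 0 (by simp)
    · intro i hi
      rw [PySem.List.mem_pyRange_one] at hi
      obtain ⟨hi1, hi2⟩ := hi
      obtain ⟨k, rfl⟩ : ∃ k : Nat, i = (k : Int) := ⟨i.toNat, (Int.toNat_of_nonneg (by omega)).symm⟩
      have hk : k < (m0 :: ms).length := by
        simp only [List.length_cons] at hi2 ⊢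
        exact_mod_cast hi2
      have hk1 : 1 ≤ k := by exact_mod_cast hi1
      obtain ⟨k', rfl⟩ : ∃ k', k = k' + 1 := ⟨k - 1, by omega⟩
      have hget : PySem.List.pyGetD (m0 :: ms) ((k' + 1 : Nat) : Int) ([] : List (String × List Int)) =
          ms[k']'(by simpa using hk) := by
        rw [PySem.List.pyGetD_natCast]
        exact List.getD_eq_getElem _ _ hk
      rw [hget]
      apply (PySem.Set.contains_iff _ _).mpr
      rw [PySem.Set.mem_ofList]
      have := hp (k' + 1) (by simpa using hk)
      simpa using this
  · intro hne
    obtain ⟨y, hy⟩ := List.exists_mem_of_ne_nil _ hne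
    rw [pv_fold_filter_mem] at hy
    obtain ⟨hy0, hall⟩ := hy
    refine ⟨y, ?_⟩
    intro j hj
    cases j with
    | zero =>
      rw [PySem.Set.mem_ofList] at hy0
      simpa using hy0
    | succ k =>
      have hk : k < ms.length := by simpa using hj
      have hin : ((k + 1 : Nat) : Int) ∈ PySem.List.pyRange 1 (((m0 :: ms).length : Nat) : Int) := by
        rw [PySem.List.mem_pyRange_one]
        constructor
        · push_cast; omega
        · simp only [List.length_cons]; push_cast; omega
      have := hall _ hin
      have hget : PySem.List.pyGetD (m0 :: ms) ((k + 1 : Nat) : Int) ([] : List (String × List Int)) =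
          ms[k]'hk := by
        rw [PySem.List.pyGetD_natCast]
        exact List.getD_eq_getElem _ _ (by simpa using hj)
      rw [hget] at this
      have hmem := (PySem.Set.contains_iff _ _).mp this
      rw [PySem.Set.mem_ofList] at hmem
      simpa using hmem

-- A's append-accumulator loop is the filter of its predicate
theorem pv_foldl_filter {α : Type} (l : List α) (p : α → Bool) (acc : List α) :
    l.foldl (fun res x => if p x then res ++ [x] else res) acc = acc ++ l.filter p := by
  induction l generalizing acc with
  | nil => simp
  | cons x l ih => by_cases h : p x <;> simp [List.foldl_cons, h, ih]

-- the whole per-candidate loops agree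
theorem pv_main (maps : List (List (String × List Int))) (cand : List String) (hm : maps ≠ []) :
    cand.foldl (fun res doc =>
      if pvAfound (maps.map (fun m => PySem.Set.ofList (PySem.Dict.getD (PySem.Dict.mk m) doc []))) then res ++ [doc] else res) [] =
    List.filter (fun doc => pvHasPhrase maps doc) cand := by
  rw [pv_foldl_filter cand
    (fun doc => pvAfound (maps.map (fun m => PySem.Set.ofList (PySem.Dict.getD (PySem.Dict.mk m) doc []))))]
  rw [List.nil_append]
  exact List.filter_congr (fun doc _ => pv_key maps doc hm)

-- ===== VERDICT (by name: the statement is the Claim_ definition above) =====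

theorem phrase_search_adjacent_spec : Claim_equal_phrase_search_adjacent := by
  intro tp terms _
  unfold Spec_phrase_search_adjacent phrase_search_adjacent phrase_search_adjacent_alt
  by_cases h : terms = []
  · simp [h]
  · simp only [h, List.map_eq_nil_iff, if_false]
    exact pv_main (terms.map (fun t => PySem.Dict.getD (PySem.Dict.mk tp) t [])) _
      (by simpa using h)
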